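-- pv_equiv track=rewrite | github.com/qifanyyy/JupyterNotebook | new_algs/Numerical algorithms/Matrix+multiplication+algorithms/query_utils.py | get_node_matrix
-- ===== SOURCE A (Python) =====
-- def get_node_matrix(V, ROW, COL, n, size):
--
--     num_docs = size[0]
--     num_cols = size[1]
--
--     # IDEA:   Reconstruct a specific column.
--     # INPUT:  (int)         col_idx - index in node matrix
--     # OUTPUT: (list[int])   col     - reconstructed column
--     def get_node_matrix_col(col_idx):
--         idx_start = COL[col_idx]
--         idx_end = COL[col_idx + 1] if col_idx + 1 < num_cols else n
--         t_data = [0]*num_docs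
--         for i in range(idx_start, idx_end):
--             t_data[ROW[i]] = V[i]
--         return t_data
--
--     node_matrix = [[None]*num_cols for _ in range(num_docs)]
--
--     for col_idx in range(num_cols):
--         t_data = get_node_matrix_col(col_idx)
--         for row in range(num_docs):
--             node_matrix[row][col_idx] = t_data[row]
--
--     return node_matrix
-- ===== SOURCE B (Python) =====
-- def get_node_matrix(V, ROW, COL, n, size):
--     num_docs, num_cols = size
--     # dense zero matrix; scatter the nonzeros of each CSC column straight into it
--     node_matrix = [[0] * num_cols for _ in range(num_docs)]
--     for col_idx in range(num_cols):
--         idx_start = COL[col_idx]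
--         idx_end = COL[col_idx + 1] if col_idx + 1 < num_cols else n
--         for i in range(idx_start, idx_end):
--             node_matrix[ROW[i]][col_idx] = V[i]
--     return node_matrix
-- ===== Notes on version B (the rewrite author's own statement) =====
-- stated objective: simpler
-- what changed: B initializes the dense result as a zero matrix and scatters each column's nonzeros straight into it, dropping A's inner helper, the per-column temporary array and the full-width per-column row-copy loop.
import Mathlib
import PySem

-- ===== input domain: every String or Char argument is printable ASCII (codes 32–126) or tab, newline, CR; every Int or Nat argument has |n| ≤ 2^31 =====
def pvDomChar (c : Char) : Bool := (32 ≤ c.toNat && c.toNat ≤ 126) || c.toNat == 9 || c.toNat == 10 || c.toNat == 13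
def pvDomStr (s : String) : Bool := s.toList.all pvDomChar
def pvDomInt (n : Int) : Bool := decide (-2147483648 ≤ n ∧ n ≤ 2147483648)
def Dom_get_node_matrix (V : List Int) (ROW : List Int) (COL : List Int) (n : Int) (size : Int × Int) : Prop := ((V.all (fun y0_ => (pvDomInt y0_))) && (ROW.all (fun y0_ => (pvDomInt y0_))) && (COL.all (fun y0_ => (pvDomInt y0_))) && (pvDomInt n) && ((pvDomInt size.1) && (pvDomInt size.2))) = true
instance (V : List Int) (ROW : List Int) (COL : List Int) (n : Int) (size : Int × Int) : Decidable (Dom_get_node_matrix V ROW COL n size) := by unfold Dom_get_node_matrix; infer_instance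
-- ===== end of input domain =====

-- B drops A's per-column temporary array and full-width row-copy loop and scatters each
-- column's nonzeros straight into the dense zero-initialized result (objective: simpler).
-- A mutates nothing observable; equivalence is about the return value.

-- ===== PORT A =====
-- shared primitive: the Python statement  nm[r][c] = v  (performed verbatim by both programs)
def pvSetCell (nm : List (List Int)) (r c : Int) (v : Int) : List (List Int) :=
  PySem.List.pySetD nm r (PySem.List.pySetD (PySem.List.pyGetD nm r []) c v)

-- A's inner helper get_node_matrix_col
def pvColA (V ROW COL : List Int) (n num_docs num_cols : Int) (col_idx : Int) : List Int :=
  let idx_start := PySem.List.pyGetD COL col_idx 0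
  let idx_end := if col_idx + 1 < num_cols then PySem.List.pyGetD COL (col_idx + 1) 0 else n
  (PySem.List.pyRange idx_start idx_end 1).foldl
    (fun t i => PySem.List.pySetD t (PySem.List.pyGetD ROW i 0) (PySem.List.pyGetD V i 0))
    (List.replicate num_docs.toNat 0)

-- Python initializes the matrix with None; every cell is overwritten before return, so 0 stands in
def get_node_matrix (V : List Int) (ROW : List Int) (COL : List Int) (n : Int) (size : Int × Int) : List (List Int) :=
  let num_docs := size.1
  let num_cols := size.2
  (PySem.List.pyRange 0 num_cols 1).foldl
    (fun nm col_idx =>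
      let t := pvColA V ROW COL n num_docs num_cols col_idx
      (PySem.List.pyRange 0 num_docs 1).foldl
        (fun nm row => pvSetCell nm row col_idx (PySem.List.pyGetD t row 0)) nm)
    (List.replicate num_docs.toNat (List.replicate num_cols.toNat 0))

-- ===== PORT B =====
def get_node_matrix_alt (V : List Int) (ROW : List Int) (COL : List Int) (n : Int) (size : Int × Int) : List (List Int) :=
  let num_docs := size.1
  let num_cols := size.2
  (PySem.List.pyRange 0 num_cols 1).foldl
    (fun nm col_idx =>
      let idx_start := PySem.List.pyGetD COL col_idx 0
      let idx_end := if col_idx + 1 < num_cols then PySem.List.pyGetD COL (col_idx + 1) 0 else n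
      (PySem.List.pyRange idx_start idx_end 1).foldl
        (fun nm i => pvSetCell nm (PySem.List.pyGetD ROW i 0) col_idx (PySem.List.pyGetD V i 0)) nm)
    (List.replicate num_docs.toNat (List.replicate num_cols.toNat 0))

-- ===== PRECONDITION & SPEC =====
-- exactly the inputs on which the Python A returns (every COL/ROW/V subscript and every
-- t_data[ROW[i]] assignment in range, Python's negative-index wraparound included)
def Pre_get_node_matrix (V : List Int) (ROW : List Int) (COL : List Int) (n : Int) (size : Int × Int) : Prop :=
  (0 < size.2 → size.2 ≤ (COL.length : Int)) ∧
  ∀ c ∈ PySem.List.pyRange 0 (min size.2 (COL.length : Int)) 1,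
    (PySem.List.pyGetD COL c 0 <
        (if c + 1 < size.2 then PySem.List.pyGetD COL (c + 1) 0 else n) →
      -(ROW.length : Int) ≤ PySem.List.pyGetD COL c 0 ∧
      (if c + 1 < size.2 then PySem.List.pyGetD COL (c + 1) 0 else n) ≤ (ROW.length : Int) ∧
      -(V.length : Int) ≤ PySem.List.pyGetD COL c 0 ∧
      (if c + 1 < size.2 then PySem.List.pyGetD COL (c + 1) 0 else n) ≤ (V.length : Int)) ∧
    ∀ i ∈ PySem.List.pyRange (max (PySem.List.pyGetD COL c 0) (-(ROW.length : Int)))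
        (min (if c + 1 < size.2 then PySem.List.pyGetD COL (c + 1) 0 else n) (ROW.length : Int)) 1,
      -size.1 ≤ PySem.List.pyGetD ROW i 0 ∧ PySem.List.pyGetD ROW i 0 < size.1

instance (V : List Int) (ROW : List Int) (COL : List Int) (n : Int) (size : Int × Int) : Decidable (Pre_get_node_matrix V ROW COL n size) := by unfold Pre_get_node_matrix; infer_instance

def pvWitness_get_node_matrix : List Int × List Int × List Int × Int × (Int × Int) :=
  ([5, 7], [1, 0], [0, 1], 2, (2, 2))

def Spec_get_node_matrix (V : List Int) (ROW : List Int) (COL : List Int) (n : Int) (size : Int × Int) (out : List (List Int)) : Prop := out = get_node_matrix_alt V ROW COL n size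
instance (V : List Int) (ROW : List Int) (COL : List Int) (n : Int) (size : Int × Int) (out : List (List Int)) : Decidable (Spec_get_node_matrix V ROW COL n size out) := by unfold Spec_get_node_matrix; infer_instance

-- ===== CLAIM (what is proved, stated in full; the proofs are below) =====
def Claim_equal_get_node_matrix : Prop := ∀ (V : List Int) (ROW : List Int) (COL : List Int) (n : Int) (size : Int × Int), Dom_get_node_matrix V ROW COL n size → Pre_get_node_matrix V ROW COL n size → Spec_get_node_matrix V ROW COL n size (get_node_matrix V ROW COL n size)

-- ===== LEMMAS AND PROOFS =====

-- writing column c of nm from the vector t, row by row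
def pvZipCol (nm : List (List Int)) (c : Int) (t : List Int) : List (List Int) :=
  List.zipWith (fun row tv => PySem.List.pySetD row c tv) nm t

lemma pvIdx_some (len : Nat) (i : Int) (h1 : -(len : Int) ≤ i) (h2 : i < (len : Int)) :
    ∃ k, PySem.List.pyIdx? len i = some k ∧ k < len := by
  unfold PySem.List.pyIdx?
  by_cases h : 0 ≤ i
  · exact ⟨i.toNat, by rw [if_pos h, if_pos h2], by omega⟩
  · exact ⟨len - (-i).toNat, by rw [if_neg h, if_pos h1], by omega⟩

lemma pyIdx_lt_of_some {len : Nat} {i : Int} {k : Nat} (h : PySem.List.pyIdx? len i = some k) :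
    k < len := by
  unfold PySem.List.pyIdx? at h
  split_ifs at h <;> injection h with h' <;> omega

-- overwriting the same cell twice keeps only the second value
lemma pySetD_pySetD (row : List Int) (c : Int) (w v : Int) :
    PySem.List.pySetD (PySem.List.pySetD row c w) c v = PySem.List.pySetD row c v := by
  unfold PySem.List.pySetD PySem.List.pySet?
  cases h : PySem.List.pyIdx? row.length c with
  | none => simp [h]
  | some k => simp [h, List.length_set, List.set_set]

-- a write at column c does not change the value read at a different column c'
lemma pyGetD_pySetD_ne (row : List Int) (c c' : Int) (v : Int)
    (hc : 0 ≤ c) (hc' : 0 ≤ c') (hne : c ≠ c') :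
    PySem.List.pyGetD (PySem.List.pySetD row c v) c' 0 = PySem.List.pyGetD row c' 0 := by
  unfold PySem.List.pyGetD
  rw [PySem.List.pySetD_of_nonneg row v hc, PySem.List.pyGet?_of_nonneg (row.set c.toNat v) hc',
      PySem.List.pyGet?_of_nonneg row hc', List.getElem?_set_ne (by omega)]

-- writing back a 0 where a 0 is read leaves the row unchanged
lemma pySetD_zero_self (row : List Int) (c : Int) (h : PySem.List.pyGetD row c 0 = 0) :
    PySem.List.pySetD row c 0 = row := by
  unfold PySem.List.pySetD PySem.List.pySet?
  cases hk : PySem.List.pyIdx? row.length c with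
  | none => simp
  | some k =>
    have hklt : k < row.length := pyIdx_lt_of_some hk
    unfold PySem.List.pyGetD PySem.List.pyGet? at h
    rw [hk] at h
    simp only [Option.bind_some, List.getElem?_eq_getElem hklt, Option.getD_some] at h
    simp [← h, List.set_getElem_self]

lemma scatter_length (L : List Int) (fr fv : Int → Int) :
    ∀ t0 : List Int,
      (L.foldl (fun t i => PySem.List.pySetD t (fr i) (fv i)) t0).length = t0.length := by
  induction L with
  | nil => intro t0; rfl
  | cons x L ih =>
    intro t0
    simpa [PySem.List.length_pySetD] using ih (PySem.List.pySetD t0 (fr x) (fv x))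

lemma zipWith_set_right (f : List Int → Int → List Int) (nm : List (List Int)) (t : List Int)
    (k : Nat) (v : Int) (hk : k < nm.length) (hlen : t.length = nm.length) :
    List.zipWith f nm (t.set k v) = (List.zipWith f nm t).set k (f nm[k] (v)) := by
  apply List.ext_getElem
  · simp [hlen]
  · intro i h1 h2
    simp only [List.length_zipWith, List.length_set, hlen, Nat.min_self] at h1
    rw [List.getElem_zipWith, List.getElem_set, List.getElem_set]
    by_cases hik : k = i
    · subst hik; simp
    · simp [hik, List.getElem_zipWith]

lemma pySetD_eq_set_of_pyIdx {α : Type} (xs : List α) (i : Int) (k : Nat) (v : α)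
    (h : PySem.List.pyIdx? xs.length i = some k) :
    PySem.List.pySetD xs i v = xs.set k v := by
  simp [PySem.List.pySetD, PySem.List.pySet?, h]

lemma pyGetD_eq_of_pyIdx {α : Type} (xs : List α) (i : Int) (k : Nat) (d : α)
    (h : PySem.List.pyIdx? xs.length i = some k) (hk : k < xs.length) :
    PySem.List.pyGetD xs i d = xs[k] := by
  simp [PySem.List.pyGetD, PySem.List.pyGet?, h, List.getElem?_eq_getElem hk]

-- the commuting step: a cell write into column c of a zipCol is a vector write
lemma cell_comm (nm : List (List Int)) (t : List Int) (c r v : Int)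
    (hlen : t.length = nm.length) (h1 : -(nm.length : Int) ≤ r) (h2 : r < (nm.length : Int)) :
    pvSetCell (pvZipCol nm c t) r c v = pvZipCol nm c (PySem.List.pySetD t r v) := by
  obtain ⟨k, hk, hklt⟩ := pvIdx_some nm.length r h1 h2
  have hzlen : (pvZipCol nm c t).length = nm.length := by
    simp [pvZipCol, hlen]
  have hkz : k < (pvZipCol nm c t).length := by omega
  have hget : (pvZipCol nm c t)[k] = PySem.List.pySetD (nm[k]'(by omega)) c (t[k]'(by omega)) := by
    simp [pvZipCol, List.getElem_zipWith]
  unfold pvSetCell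
  rw [pySetD_eq_set_of_pyIdx t r k v (by rw [hlen]; exact hk),
      pySetD_eq_set_of_pyIdx (pvZipCol nm c t) r k _ (by rw [hzlen]; exact hk),
      pyGetD_eq_of_pyIdx (pvZipCol nm c t) r k [] (by rw [hzlen]; exact hk) hkz, hget,
      pySetD_pySetD]
  unfold pvZipCol
  rw [zipWith_set_right _ _ _ _ _ hklt hlen]

-- scattering cell writes into column c of a matrix = scattering into the column vector
lemma scatter_comm (L : List Int) (fr fv : Int → Int) (c : Int) (nm : List (List Int)) :
    ∀ t0 : List Int, t0.length = nm.length →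
      (∀ i ∈ L, -(nm.length : Int) ≤ fr i ∧ fr i < (nm.length : Int)) →
      L.foldl (fun nm' i => pvSetCell nm' (fr i) c (fv i)) (pvZipCol nm c t0)
        = pvZipCol nm c (L.foldl (fun t i => PySem.List.pySetD t (fr i) (fv i)) t0) := by
  induction L with
  | nil => intro t0 _ _; rfl
  | cons x L ih =>
    intro t0 hlen hr
    have hx := hr x (by simp)
    simp only [List.foldl_cons]
    rw [cell_comm nm t0 c (fr x) (fv x) hlen hx.1 hx.2]
    exact ih (PySem.List.pySetD t0 (fr x) (fv x))
      (by rw [PySem.List.length_pySetD]; exact hlen)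
      (fun i hi => hr i (by simp [hi]))

-- a matrix whose column c is all zeros absorbs a zipCol with the zero vector
lemma zipCol_replicate_zero (c : Int) :
    ∀ nm : List (List Int), (∀ row ∈ nm, PySem.List.pyGetD row c 0 = 0) →
      pvZipCol nm c (List.replicate nm.length 0) = nm := by
  intro nm
  induction nm with
  | nil => intro _; rfl
  | cons row nm ih =>
    intro h
    simp only [List.length_cons, List.replicate_succ, pvZipCol, List.zipWith_cons_cons]
    rw [pySetD_zero_self row c (h row (by simp))]
    have := ih (fun r hr => h r (by simp [hr]))
    simp only [pvZipCol] at this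
    rw [this]

lemma pyGetD_replicate_zero (k : Nat) (c : Int) :
    PySem.List.pyGetD (List.replicate k (0 : Int)) c 0 = 0 := by
  unfold PySem.List.pyGetD PySem.List.pyGet?
  cases h : PySem.List.pyIdx? (List.replicate k (0 : Int)).length c with
  | none => simp
  | some j =>
    have := pyIdx_lt_of_some h
    simp_all [List.getElem?_replicate]

lemma mem_zipWith_exists {f : List Int → Int → List Int} {nm : List (List Int)} :
    ∀ {t : List Int} {row' : List Int}, row' ∈ List.zipWith f nm t →
      ∃ row tv, row ∈ nm ∧ row' = f row tv := by
  induction nm with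
  | nil => intro t row' h; simp at h
  | cons row nm ih =>
    intro t row' h
    cases t with
    | nil => simp at h
    | cons tv t =>
      simp only [List.zipWith_cons_cons, List.mem_cons] at h
      rcases h with h | h
      · exact ⟨row, tv, by simp, h⟩
      · obtain ⟨r, w, hr, hw⟩ := ih h
        exact ⟨r, w, by simp [hr], hw⟩

-- copying t element by element over any same-length vector yields t
lemma vcopy_aux (t : List Int) :
    ∀ (k : Nat) (t0 : List Int), k ≤ t.length → t0.length = t.length →
      (PySem.List.pyRange 0 (k : Int) 1).foldl
          (fun t' r => PySem.List.pySetD t' r (PySem.List.pyGetD t r 0)) t0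
        = t.take k ++ t0.drop k := by
  intro k
  induction k with
  | zero => intro t0 _ _; simp [PySem.List.pyRange_one_eq_nil]
  | succ k ih =>
    intro t0 hk hlen
    have hk' : k ≤ t.length := by omega
    have hkt : k < t.length := by omega
    have hcast : ((k + 1 : Nat) : Int) = (k : Int) + 1 := by push_cast; ring
    rw [hcast, PySem.List.pyRange_one_succ_right (by positivity), List.foldl_append]
    rw [ih t0 hk' hlen]
    have hMlen : (t.take k ++ t0.drop k).length = t.length := by
      simp [hlen]; omega
    simp only [List.foldl_cons, List.foldl_nil]
    rw [PySem.List.pySetD_natCast, PySem.List.pyGetD_natCast,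
        List.getD_eq_getElem t 0 hkt]
    have htake : (t.take k).length = k := by simp; omega
    rw [List.set_append_right _ _ (by omega), htake]
    rw [List.drop_eq_getElem_cons (by omega : k < t0.length)]
    simp only [Nat.sub_self, List.set_cons_zero]
    rw [List.take_succ_eq_append_getElem hkt, List.append_assoc]
    rfl

lemma vcopy (dI : Int) (t : List Int) (ht : t.length = dI.toNat) :
    ∀ t0 : List Int, t0.length = dI.toNat →
      (PySem.List.pyRange 0 dI 1).foldl
          (fun t' r => PySem.List.pySetD t' r (PySem.List.pyGetD t r 0)) t0
        = t := by
  intro t0 h0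
  by_cases hd : dI ≤ 0
  · have : dI.toNat = 0 := by omega
    rw [this] at ht h0
    rw [PySem.List.pyRange_one_eq_nil hd]
    simp [List.eq_nil_of_length_eq_zero ht, List.eq_nil_of_length_eq_zero h0]
  · have hcast : dI = ((dI.toNat : Nat) : Int) := by omega
    rw [hcast, vcopy_aux t dI.toNat t0 (by omega) (by omega)]
    rw [← ht, List.take_length, List.drop_of_length_le (by omega), List.append_nil]

lemma colA_length (V ROW COL : List Int) (n nd nc c : Int) :
    (pvColA V ROW COL n nd nc c).length = nd.toNat := by
  unfold pvColA
  rw [scatter_length]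
  simp

-- one column step: both programs turn nm into (pvZipCol nm c t), where t is A's column vector
lemma stepA_eq (V ROW COL : List Int) (n : Int) (size : Int × Int) (c : Int)
    (nm : List (List Int)) (hnm : nm.length = size.1.toNat)
    (hz : ∀ row ∈ nm, PySem.List.pyGetD row c 0 = 0) :
    (PySem.List.pyRange 0 size.1 1).foldl
        (fun nm' row => pvSetCell nm' row c
          (PySem.List.pyGetD (pvColA V ROW COL n size.1 size.2 c) row 0)) nm
      = pvZipCol nm c (pvColA V ROW COL n size.1 size.2 c) := by
  have hbase : pvZipCol nm c (List.replicate nm.length 0) = nm :=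
    zipCol_replicate_zero c nm hz
  conv_lhs => rw [← hbase]
  rw [scatter_comm (PySem.List.pyRange 0 size.1 1) (fun i => i)
        (fun i => PySem.List.pyGetD (pvColA V ROW COL n size.1 size.2 c) i 0) c nm
        (List.replicate nm.length 0) (by simp)
        (by
          intro i hi
          rw [PySem.List.mem_pyRange_one] at hi
          simp only [hnm]
          omega)]
  congr 1
  exact vcopy size.1 (pvColA V ROW COL n size.1 size.2 c)
    (colA_length V ROW COL n size.1 size.2 c)
    (List.replicate nm.length 0) (by simp [hnm])

lemma stepB_eq (V ROW COL : List Int) (n : Int) (size : Int × Int) (c : Int)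
    (nm : List (List Int)) (hnm : nm.length = size.1.toNat)
    (hz : ∀ row ∈ nm, PySem.List.pyGetD row c 0 = 0)
    (hpre : ∀ i ∈ PySem.List.pyRange (PySem.List.pyGetD COL c 0)
        (if c + 1 < size.2 then PySem.List.pyGetD COL (c + 1) 0 else n) 1,
        -size.1 ≤ PySem.List.pyGetD ROW i 0 ∧ PySem.List.pyGetD ROW i 0 < size.1) :
    (PySem.List.pyRange (PySem.List.pyGetD COL c 0)
        (if c + 1 < size.2 then PySem.List.pyGetD COL (c + 1) 0 else n) 1).foldl
        (fun nm' i => pvSetCell nm' (PySem.List.pyGetD ROW i 0) c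
          (PySem.List.pyGetD V i 0)) nm
      = pvZipCol nm c (pvColA V ROW COL n size.1 size.2 c) := by
  have hbase : pvZipCol nm c (List.replicate nm.length 0) = nm :=
    zipCol_replicate_zero c nm hz
  conv_lhs => rw [← hbase]
  rw [scatter_comm _ (fun i => PySem.List.pyGetD ROW i 0)
        (fun i => PySem.List.pyGetD V i 0) c nm
        (List.replicate nm.length 0) (by simp)
        (by
          intro i hi
          have h := hpre i hi
          simp only [hnm]
          omega)]
  congr 1
  unfold pvColA
  simp only [hnm]

-- the main loop: from any column a on, A's fold and B's fold coincide
lemma main_loop (V ROW COL : List Int) (n : Int) (size : Int × Int)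
    (hpre : Pre_get_node_matrix V ROW COL n size) :
    ∀ (k : Nat) (a : Int), 0 ≤ a → (size.2 - a).toNat = k →
    ∀ nm : List (List Int), nm.length = size.1.toNat →
      (∀ row ∈ nm, ∀ c', a ≤ c' → PySem.List.pyGetD row c' 0 = 0) →
      (PySem.List.pyRange a size.2 1).foldl
          (fun nm' col_idx =>
            (PySem.List.pyRange 0 size.1 1).foldl
              (fun nm'' row => pvSetCell nm'' row col_idx
                (PySem.List.pyGetD (pvColA V ROW COL n size.1 size.2 col_idx) row 0)) nm') nm
        = (PySem.List.pyRange a size.2 1).foldl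
            (fun nm' col_idx =>
              (PySem.List.pyRange (PySem.List.pyGetD COL col_idx 0)
                  (if col_idx + 1 < size.2 then PySem.List.pyGetD COL (col_idx + 1) 0 else n) 1).foldl
                (fun nm'' i => pvSetCell nm'' (PySem.List.pyGetD ROW i 0) col_idx
                  (PySem.List.pyGetD V i 0)) nm') nm := by
  intro k
  induction k with
  | zero =>
    intro a ha hk nm _ _
    rw [PySem.List.pyRange_one_eq_nil (show size.2 ≤ a by omega)]
    rfl
  | succ k ih =>
    intro a ha hk nm hnm hz
    have hab : a < size.2 := by omega
    rw [PySem.List.pyRange_one_cons hab]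
    simp only [List.foldl_cons]
    have hzcol : ∀ row ∈ nm, PySem.List.pyGetD row a 0 = 0 :=
      fun row hr => hz row hr a le_rfl
    have hcl : size.2 ≤ (COL.length : Int) := hpre.1 (by omega)
    have hpa := hpre.2 a (by rw [PySem.List.mem_pyRange_one]; omega)
    rw [stepA_eq V ROW COL n size a nm hnm hzcol,
        stepB_eq V ROW COL n size a nm hnm hzcol
          (fun i hi => by
            rw [PySem.List.mem_pyRange_one] at hi
            have hb := hpa.1 (by omega)
            exact hpa.2 i (by rw [PySem.List.mem_pyRange_one]; omega))]
    apply ih (a + 1) (by omega) (by omega)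
    · simp [pvZipCol, hnm, colA_length, List.length_zipWith]
    · intro row' hrow' c' hc'
      obtain ⟨row, tv, hrow, rfl⟩ := mem_zipWith_exists hrow'
      rw [pyGetD_pySetD_ne row a c' tv ha (by omega) (by omega)]
      exact hz row hrow c' (by omega)

-- ===== VERDICT (by name: the statement is the Claim_ definition above) =====
theorem get_node_matrix_spec : Claim_equal_get_node_matrix := by
  intro V ROW COL n size _ hpre
  unfold Spec_get_node_matrix get_node_matrix get_node_matrix_alt
  have h := main_loop V ROW COL n size hpre (size.2).toNat 0 le_rfl (by omega)
    (List.replicate size.1.toNat (List.replicate size.2.toNat 0))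
    (by simp)
    (by
      intro row hrow c' _
      rw [List.eq_of_mem_replicate hrow]
      exact pyGetD_replicate_zero size.2.toNat c')
  simpa using h
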